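-- pv_equiv track=rewrite | github.com/chowen-zz/neuralmem | src/neuralmem/extraction/code_chunker.py | _blank_line_boundaries
-- ===== SOURCE A (Python) =====
-- def _blank_line_boundaries(lines: list[str]) -> list[tuple[int, int]]:
--     """Group consecutive non-blank lines separated by blank lines."""
--     boundaries: list[tuple[int, int]] = []
--     start: int | None = None
--     for i, line in enumerate(lines, start=1):
--         if line.strip():
--             if start is None:
--                 start = i
--         else:
--             if start is not None:
--                 boundaries.append((start, i - 1))
--                 start = None
--     if start is not None:
--         boundaries.append((start, len(lines)))
--     return boundaries
-- ===== SOURCE B (Python) =====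
-- def _blank_line_boundaries(lines: list[str]) -> list[tuple[int, int]]:
--     """Group consecutive non-blank lines separated by blank lines."""
--     boundaries: list[tuple[int, int]] = []
--     i = 0
--     n = len(lines)
--     while i < n:
--         if not lines[i].strip():
--             i += 1
--             continue
--         j = i
--         while j + 1 < n and lines[j + 1].strip():
--             j += 1
--         boundaries.append((i + 1, j + 1))
--         i = j + 2
--     return boundaries
-- ===== Notes on version B (the rewrite author's own statement) =====
-- stated objective: alternative
-- what changed: Replaced the Optional start sentinel state machine with post-loop flush by a run-scanning two-pointer loop: on each non-blank line, scan forward to the end of the run and emit its boundaries directly, then jump past the following blank.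
import Mathlib
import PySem

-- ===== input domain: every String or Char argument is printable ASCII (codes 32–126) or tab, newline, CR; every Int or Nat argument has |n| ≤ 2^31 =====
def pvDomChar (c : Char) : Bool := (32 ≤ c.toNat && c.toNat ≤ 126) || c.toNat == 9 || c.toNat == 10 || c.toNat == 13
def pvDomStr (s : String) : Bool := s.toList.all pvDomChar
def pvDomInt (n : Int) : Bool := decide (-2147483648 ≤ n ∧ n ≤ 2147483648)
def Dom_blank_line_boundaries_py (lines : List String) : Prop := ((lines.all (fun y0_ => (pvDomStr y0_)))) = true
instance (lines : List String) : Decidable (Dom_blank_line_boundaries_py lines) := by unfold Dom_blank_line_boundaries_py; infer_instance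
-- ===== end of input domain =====

-- B replaces A's Optional `start` sentinel state machine (with post-loop flush) by a
-- run-scanning loop that emits each non-blank run's boundaries directly (objective: alternative).

-- `line.strip()` is falsy (blank line)
def pvBlank (l : String) : Bool := PySem.Str.strip l == ""

-- ===== PORT A =====
-- the for-loop over enumerate(lines, start=1) with state (boundaries, start)
def pvAGo (bs : List (Int × Int)) (start : Option Int) (i : Int) : List String → List (Int × Int) × Option Int
  | [] => (bs, start)
  | l :: ls =>
    if !pvBlank l then
      match start with
      | none => pvAGo bs (some i) (i + 1) ls
      | some _ => pvAGo bs start (i + 1) ls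
    else
      match start with
      | some s => pvAGo (bs ++ [(s, i - 1)]) none (i + 1) ls
      | none => pvAGo bs none (i + 1) ls

def blank_line_boundaries_py (lines : List String) : List (Int × Int) :=
  let r := pvAGo [] none 1 lines
  match r.2 with
  | some s => r.1 ++ [(s, (lines.length : Int))]
  | none => r.1

-- ===== PORT B =====
-- B's outer while loop: skip a blank line, or scan the whole non-blank run
-- (the inner `while j+1 < n and lines[j+1].strip()` scan = takeWhile/dropWhile on the rest),
-- emit its boundaries, and continue right after the run.
def pvBGo (i : Int) : List String → List (Int × Int)
  | [] => []
  | l :: ls =>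
    if pvBlank l then pvBGo (i + 1) ls
    else
      (i, i + ((ls.takeWhile (fun x => !pvBlank x)).length : Int)) ::
      pvBGo (i + ((ls.takeWhile (fun x => !pvBlank x)).length : Int) + 1)
            (ls.dropWhile (fun x => !pvBlank x))
termination_by ls => ls.length
decreasing_by
  · simp
  · exact Nat.lt_succ_of_le (List.length_dropWhile_le _ _)

def blank_line_boundaries_py_alt (lines : List String) : List (Int × Int) := pvBGo 1 lines

-- ===== PRECONDITION & SPEC =====
def Spec_blank_line_boundaries_py (lines : List String) (out : List (Int × Int)) : Prop := out = blank_line_boundaries_py_alt lines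
instance (lines : List String) (out : List (Int × Int)) : Decidable (Spec_blank_line_boundaries_py lines out) := by unfold Spec_blank_line_boundaries_py; infer_instance

-- ===== CLAIM (what is proved, stated in full; the proofs are below) =====
def Claim_equal_blank_line_boundaries_py : Prop := ∀ (lines : List String), Dom_blank_line_boundaries_py lines → Spec_blank_line_boundaries_py lines (blank_line_boundaries_py lines)

-- ===== LEMMAS AND PROOFS =====

-- closing A's loop state: flush the pending start against end index e
def pvFinish (p : List (Int × Int) × Option Int) (e : Int) : List (Int × Int) :=
  match p.2 with
  | some s => p.1 ++ [(s, e)]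
  | none => p.1

theorem pvMain : ∀ (ls : List String) (i : Int) (bs : List (Int × Int)) (st : Option Int),
    pvFinish (pvAGo bs st i ls) (i + (ls.length : Int) - 1) =
    bs ++ (match st with
           | none => pvBGo i ls
           | some s =>
             (s, i + ((ls.takeWhile (fun x => !pvBlank x)).length : Int) - 1) ::
             pvBGo (i + ((ls.takeWhile (fun x => !pvBlank x)).length : Int))
                   (ls.dropWhile (fun x => !pvBlank x))) := by
  intro ls
  induction ls with
  | nil =>
    intro i bs st
    cases st <;> simp [pvAGo, pvBGo, pvFinish]
  | cons l ls ih =>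
    intro i bs st
    by_cases hb : pvBlank l = true
    · cases st with
      | none =>
        have h1 := ih (i + 1) bs none
        simp only [pvAGo, pvBGo, hb, List.length_cons, Bool.not_true,
          Bool.false_eq_true, if_false, if_true] at h1 ⊢
        push_cast at h1 ⊢
        ring_nf at h1 ⊢
        exact h1
      | some s =>
        have h1 := ih (i + 1) (bs ++ [(s, i - 1)]) none
        simp only [pvAGo, pvBGo, hb, List.takeWhile_cons, List.dropWhile_cons,
          List.length_cons, List.length_nil, Bool.not_true, Bool.false_eq_true, if_false,
          if_true, List.append_assoc, List.singleton_append] at h1 ⊢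
        push_cast at h1 ⊢
        ring_nf at h1 ⊢
        exact h1
    · have hb' : pvBlank l = false := by simp [hb]
      cases st with
      | none =>
        have h1 := ih (i + 1) bs (some i)
        simp only [pvAGo, pvBGo, hb', List.length_cons, Bool.not_false,
          Bool.false_eq_true, if_false, if_true] at h1 ⊢
        push_cast at h1 ⊢
        ring_nf at h1 ⊢
        exact h1
      | some s =>
        have h1 := ih (i + 1) bs (some s)
        simp only [pvAGo, hb', List.takeWhile_cons, List.dropWhile_cons,
          List.length_cons, Bool.not_false, Bool.false_eq_true, if_false, if_true] at h1 ⊢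
        push_cast at h1 ⊢
        ring_nf at h1 ⊢
        exact h1

-- ===== VERDICT (by name: the statement is the Claim_ definition above) =====
theorem blank_line_boundaries_py_spec : Claim_equal_blank_line_boundaries_py := by
  intro lines _
  unfold Spec_blank_line_boundaries_py blank_line_boundaries_py blank_line_boundaries_py_alt
  have := pvMain lines 1 [] none
  simp only [pvFinish, List.nil_append] at this
  rw [show (1 : Int) + (lines.length : Int) - 1 = (lines.length : Int) by ring] at this
  exact this
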